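-- pv_equiv track=rewrite | github.com/fengges/leetcode | 701-750/709. 转换成小写字母.py | toLowerCase
-- ===== SOURCE A (Python) =====
-- def toLowerCase(str):
--     temp=''
--     for s in str:
--         t=ord(s)
--         if t>=65 and t<=90:
--             t+=32
--             temp+=chr(t)
--         else:
--             temp+=s
--     return temp
-- ===== SOURCE B (Python) =====
-- def toLowerCase(str):
--     for code in range(65, 91):
--         str = str.replace(chr(code), chr(code + 32))
--     return str
-- ===== Notes on version B (the rewrite author's own statement) =====
-- stated objective: faster
-- what changed: Instead of one Python-level pass over the characters with an ord/branch and += accumulation, B loops over the 26 uppercase letters and rewrites the whole string once per letter with str.replace (26 staged bulk passes).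
import Mathlib
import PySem

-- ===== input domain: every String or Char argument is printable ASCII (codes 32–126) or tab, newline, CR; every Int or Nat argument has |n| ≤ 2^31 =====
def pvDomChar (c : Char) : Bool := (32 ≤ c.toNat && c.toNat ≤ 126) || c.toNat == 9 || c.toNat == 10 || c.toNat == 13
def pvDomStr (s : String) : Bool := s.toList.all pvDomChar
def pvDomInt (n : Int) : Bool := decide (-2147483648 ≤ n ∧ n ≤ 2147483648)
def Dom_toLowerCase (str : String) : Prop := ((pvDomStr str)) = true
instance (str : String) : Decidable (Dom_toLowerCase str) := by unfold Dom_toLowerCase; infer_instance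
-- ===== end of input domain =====

-- B replaces A's single per-character ord/branch accumulation pass by 26 staged
-- whole-string passes, one str.replace per uppercase letter (alternative; same result).

-- ===== PORT A =====
-- the accumulation loop 'for s in str: …' over the characters, building temp left to right
def toLowerCaseGo (acc : List Char) : List Char → List Char
  | [] => acc
  | c :: rest =>
    let t : Int := c.toNat
    if 65 ≤ t ∧ t ≤ 90 then
      toLowerCaseGo (acc ++ [Char.ofNat (t + 32).toNat]) rest
    else
      toLowerCaseGo (acc ++ [c]) rest

def toLowerCase (str : String) : String :=
  String.ofList (toLowerCaseGo [] str.toList)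

-- ===== PORT B =====
-- 'for code in range(65, 91): str = str.replace(chr(code), chr(code + 32))'
def toLowerCase_alt (str : String) : String :=
  (PySem.List.pyRange 65 91 1).foldl
    (fun s i =>
      PySem.Str.replace s (String.ofList [Char.ofNat i.toNat])
        (String.ofList [Char.ofNat (i.toNat + 32)])) str

-- ===== PRECONDITION & SPEC =====
def Spec_toLowerCase (str : String) (out : String) : Prop := out = toLowerCase_alt str
instance (str : String) (out : String) : Decidable (Spec_toLowerCase str out) := by unfold Spec_toLowerCase; infer_instance

-- ===== CLAIM (what is proved, stated in full; the proofs are below) =====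
def Claim_equal_toLowerCase : Prop := ∀ (str : String), Dom_toLowerCase str → Spec_toLowerCase str (toLowerCase str)

-- ===== LEMMAS AND PROOFS =====

set_option maxRecDepth 10000
set_option maxHeartbeats 1600000

-- the per-character translation A performs, as a function
def pvStep (c : Char) : Char :=
  if 65 ≤ c.toNat ∧ c.toNat ≤ 90 then Char.ofNat (c.toNat + 32) else c

theorem toLowerCaseGo_eq (l : List Char) : ∀ acc, toLowerCaseGo acc l = acc ++ l.map pvStep := by
  induction l with
  | nil => intro acc; simp [toLowerCaseGo]
  | cons c rest ih =>
    intro acc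
    by_cases h : 65 ≤ c.toNat ∧ c.toNat ≤ 90
    · have h32 : ((c.toNat : Int) + 32).toNat = c.toNat + 32 := by omega
      simp [toLowerCaseGo, h, ih, pvStep, h32]
    · simp [toLowerCaseGo, h, ih, pvStep]

-- one single-character replace pass is a charwise map
def pvSubst (a b c : Char) : Char := if c = a then b else c

theorem replace_go_single (a b : Char) (l : List Char) :
    ∀ fuel acc, l.length ≤ fuel →
      PySem.Chars.replace.go [a] [b] fuel l acc = acc.reverse ++ l.map (pvSubst a b) := by
  induction l with
  | nil =>
    intro fuel acc _
    cases fuel <;> simp [PySem.Chars.replace.go]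
  | cons c t ih =>
    intro fuel acc hlen
    cases fuel with
    | zero => simp at hlen
    | succ f =>
      by_cases h : a = c
      · subst h
        have hp : List.isPrefixOf [a] (a :: t) = true := by simp [List.isPrefixOf]
        simp only [PySem.Chars.replace.go, hp, if_pos]
        rw [show List.drop [a].length (a :: t) = t from by simp,
            show [b].reverse ++ acc = b :: acc from by simp]
        rw [ih f (b :: acc) (Nat.le_of_succ_le_succ (by simpa using hlen))]
        simp [pvSubst]
      · have h' : ¬ c = a := fun hc => h hc.symm
        have hp : List.isPrefixOf [a] (c :: t) = false := by
          simp [List.isPrefixOf]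
          exact h
        simp only [PySem.Chars.replace.go, hp, Bool.false_eq_true, if_false]
        rw [ih f (c :: acc) (Nat.le_of_succ_le_succ hlen)]
        simp [pvSubst, h']

theorem replace_single (a b : Char) (l : List Char) :
    PySem.Chars.replace l [a] [b] = l.map (pvSubst a b) := by
  simp only [PySem.Chars.replace, List.isEmpty_cons, Bool.false_eq_true, if_false]
  simpa using replace_go_single a b l l.length [] le_rfl

-- a fold of charwise maps is a map of the folded character function
theorem foldl_map_comm (codes : List Int) (g : Int → Char → Char) :
    ∀ l : List Char,
      codes.foldl (fun s i => s.map (g i)) l = l.map (fun c => codes.foldl (fun c i => g i c) c) := by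
  induction codes with
  | nil => intro l; simp
  | cons i rest ih => intro l; simp [ih, List.map_map, Function.comp_def]

-- the 26 staged substitutions act on one ASCII character exactly as A's branch does
theorem pyRange_lit : PySem.List.pyRange 65 91 1
    = [65,66,67,68,69,70,71,72,73,74,75,76,77,78,79,80,81,82,83,84,85,86,87,88,89,90] := by decide

theorem staged_step_ofNat : ∀ n ∈ Finset.range 128,
    ([65,66,67,68,69,70,71,72,73,74,75,76,77,78,79,80,81,82,83,84,85,86,87,88,89,90] : List Int).foldl
      (fun c i => pvSubst (Char.ofNat i.toNat) (Char.ofNat (i.toNat + 32)) c) (Char.ofNat n)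
      = pvStep (Char.ofNat n) := by decide

theorem staged_step (c : Char) (h : pvDomChar c = true) :
    (PySem.List.pyRange 65 91 1).foldl
      (fun c i => pvSubst (Char.ofNat i.toNat) (Char.ofNat (i.toNat + 32)) c) c = pvStep c := by
  have hv : c.toNat < 128 := by simp [pvDomChar] at h; omega
  have hc : Char.ofNat c.toNat = c := Char.ofNat_toNat c
  have := staged_step_ofNat c.toNat (Finset.mem_range.mpr hv)
  rw [hc] at this
  rw [pyRange_lit]
  exact this

-- B's String-level fold, moved to the character-list level
theorem fold_replace_toList (codes : List Int) : ∀ (s : String),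
    (codes.foldl
      (fun s i =>
        PySem.Str.replace s (String.ofList [Char.ofNat i.toNat])
          (String.ofList [Char.ofNat (i.toNat + 32)])) s).toList
    = codes.foldl
        (fun l i => l.map (pvSubst (Char.ofNat i.toNat) (Char.ofNat (i.toNat + 32)))) s.toList := by
  induction codes with
  | nil => intro s; simp
  | cons i rest ih =>
    intro s
    simp only [List.foldl_cons]
    rw [ih]
    congr 1
    simp [PySem.Str.replace, replace_single]

-- ===== VERDICT (by name: the statement is the Claim_ definition above) =====
theorem toLowerCase_spec : Claim_equal_toLowerCase := by
  intro str hdom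
  unfold Spec_toLowerCase toLowerCase toLowerCase_alt
  apply String.toList_injective
  rw [fold_replace_toList, toLowerCaseGo_eq]
  simp only [List.nil_append, String.toList_ofList]
  rw [foldl_map_comm]
  apply List.map_congr_left
  intro c hc
  exact (staged_step c ((List.all_eq_true.mp hdom) c hc)).symm
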